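-- pv_equiv track=rewrite | github.com/David060195/codeSignal_companyChallenges | Dropbox/campusCup.py | solution
-- ===== SOURCE A (Python) =====
-- from collections import defaultdict
-- from operator import itemgetter
--
-- def solution(emails):
--     freq = defaultdict(int)
--     for s in emails:
--         _, domain = s.split("@")
--         freq[domain] += 20
--     for k, v in freq.items():
--         if v < 100:
--             v = 0
--         elif v >= 100 and v < 200:
--             v = -3
--         elif v >= 200 and v < 300:
--             v = -5
--         elif v >= 300 and v < 500:
--             v = -15
--         else:
--             v = -25
--         freq[k] = v
--     return [e[0] for e in sorted(freq.items(), key = itemgetter(1, 0))]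
-- ===== SOURCE B (Python) =====
-- def solution(emails):
--     counts = {}
--     for s in emails:
--         _, domain = s.split("@")
--         counts[domain] = counts.get(domain, 0) + 1
--     out = []
--     for sc in (-25, -15, -5, -3, 0):
--         out += sorted(d for d, c in counts.items() if _score(c) == sc)
--     return out
--
-- def _score(c):
--     if c < 5:
--         return 0
--     if c < 10:
--         return -3
--     if c < 15:
--         return -5
--     if c < 25:
--         return -15
--     return -25
-- ===== Notes on version B (the rewrite author's own statement) =====
-- stated objective: alternative
-- what changed: Counts occurrences by 1 instead of accumulating 20 per email, maps the count to its fixed penalty score, and replaces the composite-key comparison sort over (score, domain) pairs by bucketing: for each of the five possible scores in ascending order it sorts just the domain names of that bucket and concatenates the buckets.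
import Mathlib
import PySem

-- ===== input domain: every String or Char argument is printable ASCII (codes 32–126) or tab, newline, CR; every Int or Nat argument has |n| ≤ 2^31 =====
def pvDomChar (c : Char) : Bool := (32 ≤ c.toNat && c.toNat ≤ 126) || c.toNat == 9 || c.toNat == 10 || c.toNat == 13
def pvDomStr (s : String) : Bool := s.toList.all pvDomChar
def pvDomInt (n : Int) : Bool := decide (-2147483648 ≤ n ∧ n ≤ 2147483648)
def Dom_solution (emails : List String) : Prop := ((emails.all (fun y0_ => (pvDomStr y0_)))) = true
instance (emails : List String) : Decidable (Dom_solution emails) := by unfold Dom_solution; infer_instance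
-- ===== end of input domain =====

-- B replaces A's accumulate-20-then-rescore pass and its composite-key (score, domain) comparison sort
-- by counting occurrences once and concatenating per-score buckets of sorted names (alternative decomposition, same cost).

-- ===== PORT A =====
-- the if/elif chain of A's second loop, as a helper
def pvScoreA (v : Int) : Int :=
  if v < 100 then 0
  else if 100 ≤ v ∧ v < 200 then -3
  else if 200 ≤ v ∧ v < 300 then -5
  else if 300 ≤ v ∧ v < 500 then -15
  else -25

-- body of A's first loop; the fallthrough arm is where Python's unpack `_, domain = s.split("@")`
-- raises ValueError — those inputs are excluded by Pre_solution
def pvStepA (d : PySem.Dict String Int) (s : String) : PySem.Dict String Int :=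
  match PySem.Str.split? s "@" with
  | some [_, domain] => PySem.Dict.modify d domain 0 (· + 20)
  | _ => d

def solution (emails : List String) : List String :=
  let freq := emails.foldl pvStepA PySem.Dict.empty
  let freq2 := freq.items.foldl (fun d kv => PySem.Dict.insert d kv.1 (pvScoreA kv.2)) freq
  (PySem.List.sorted2 freq2.items (fun e => e.2) (fun e => e.1) false).map (fun e => e.1)

-- ===== PORT B =====
def pvScoreB (c : Int) : Int :=
  if c < 5 then 0
  else if c < 10 then -3
  else if c < 15 then -5
  else if c < 25 then -15
  else -25

-- body of B's counting loop (same unpack, so the same inputs raise; excluded by Pre_solution)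
def pvStepB (d : PySem.Dict String Int) (s : String) : PySem.Dict String Int :=
  match PySem.Str.split? s "@" with
  | some [_, domain] => PySem.Dict.modify d domain 0 (· + 1)
  | _ => d

def solution_alt (emails : List String) : List String :=
  let counts := emails.foldl pvStepB PySem.Dict.empty
  [(-25 : Int), -15, -5, -3, 0].foldl (fun out sc =>
    out ++ PySem.List.sorted
      ((counts.items.filter (fun kv => pvScoreB kv.2 == sc)).map (fun kv => kv.1))
      (fun x => x) false) []

-- ===== PRECONDITION & SPEC =====
-- exactly the inputs where every email contains exactly one "@" (split gives two pieces);
-- elsewhere Python A raises ValueError on the unpack `_, domain = s.split("@")`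
def Pre_solution (emails : List String) : Prop :=
  ∀ s ∈ emails, ((PySem.Str.split? s "@").getD []).length = 2

instance (emails : List String) : Decidable (Pre_solution emails) := by
  unfold Pre_solution; infer_instance

def pvWitness_solution : List String := ["a@x.com", "b@x.com", "c@y.org"]

def Spec_solution (emails : List String) (out : List String) : Prop := out = solution_alt emails
instance (emails : List String) (out : List String) : Decidable (Spec_solution emails out) := by
  unfold Spec_solution; infer_instance

-- ===== CLAIM (what is proved, stated in full; the proofs are below) =====
def Claim_equal_solution : Prop :=
  ∀ (emails : List String), Dom_solution emails → Pre_solution emails →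
    Spec_solution emails (solution emails)

-- ===== LEMMAS AND PROOFS =====

-- A's per-domain total is 20 per email; B's is 1 per email; the scores agree.
theorem pvScoreAB (c : Int) : pvScoreA (20 * c) = pvScoreB c := by
  unfold pvScoreA pvScoreB
  split_ifs <;> omega

theorem pvScoreB_mem (c : Int) : pvScoreB c ∈ [(-25 : Int), -15, -5, -3, 0] := by
  unfold pvScoreB
  split_ifs <;> simp

-- relating the two counting loops: A's dict carries 20× B's values, key for key
theorem pvModify_rel (d1 d2 : PySem.Dict String Int) (k : String)
    (h : d1.items = d2.items.map (fun p => (p.1, 20 * p.2))) :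
    (PySem.Dict.modify d1 k 0 (· + 20)).items
      = (PySem.Dict.modify d2 k 0 (· + 1)).items.map (fun p => (p.1, 20 * p.2)) := by
  have hco : d1.contains k = d2.contains k := by
    simp [PySem.Dict.contains, h, List.any_map, Function.comp_def]
  have hget : d1.get? k = (d2.get? k).map (fun v => 20 * v) := by
    simp [PySem.Dict.get?, h, List.find?_map, Function.comp_def]
  unfold PySem.Dict.modify PySem.Dict.insert PySem.Dict.getD
  rw [hco, hget]
  by_cases hc : d2.contains k = true
  · simp only [hc, if_true, h, List.map_map]
    apply List.map_congr_left
    intro q hq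
    by_cases hqk : q.1 = k <;> cases hv : d2.get? k <;>
      simp [hv, hqk] <;> try ring
  · have hnone : d2.get? k = none :=
      (PySem.Dict.get?_eq_none_iff_contains d2 k).2 (by simpa using hc)
    simp only [hc, hnone]
    simp [h]
    try ring

theorem pvStep_rel (d1 d2 : PySem.Dict String Int) (s : String)
    (h : d1.items = d2.items.map (fun p => (p.1, 20 * p.2))) :
    (pvStepA d1 s).items = (pvStepB d2 s).items.map (fun p => (p.1, 20 * p.2)) := by
  unfold pvStepA pvStepB
  rcases hsp : PySem.Str.split? s "@" with _ | l
  · exact h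
  · match l with
    | [] => exact h
    | [_] => exact h
    | [_, domain] => exact pvModify_rel d1 d2 domain h
    | _ :: _ :: _ :: _ => exact h

theorem pvBuild_rel : ∀ (emails : List String) (d1 d2 : PySem.Dict String Int),
    d1.items = d2.items.map (fun p => (p.1, 20 * p.2)) →
    (emails.foldl pvStepA d1).items
      = (emails.foldl pvStepB d2).items.map (fun p => (p.1, 20 * p.2))
  | [], _, _, h => h
  | s :: es, d1, d2, h =>
    pvBuild_rel es (pvStepA d1 s) (pvStepB d2 s) (pvStep_rel d1 d2 s h)

theorem pvStepB_keys_nodup (d : PySem.Dict String Int) (s : String)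
    (h : d.keys.Nodup) : (pvStepB d s).keys.Nodup := by
  unfold pvStepB
  rcases hsp : PySem.Str.split? s "@" with _ | l
  · exact h
  · match l with
    | [] => exact h
    | [_] => exact h
    | [_, domain] => exact PySem.Dict.nodup_keys_insert _ _ _ h
    | _ :: _ :: _ :: _ => exact h

theorem pvBuildB_keys_nodup : ∀ (emails : List String) (d : PySem.Dict String Int),
    d.keys.Nodup → (emails.foldl pvStepB d).keys.Nodup
  | [], _, h => h
  | s :: es, d, h => pvBuildB_keys_nodup es (pvStepB d s) (pvStepB_keys_nodup d s h)

-- A's second loop: re-inserting every existing key maps the values in place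
theorem pvRescore_items : ∀ (l pre : List (String × Int)),
    ((pre ++ l).map Prod.fst).Nodup →
    (l.foldl (fun d kv => PySem.Dict.insert d kv.1 (pvScoreA kv.2))
        (⟨pre.map (fun p => (p.1, pvScoreA p.2)) ++ l⟩ : PySem.Dict String Int)).items
      = (pre ++ l).map (fun p => (p.1, pvScoreA p.2))
  | [], pre, _ => by simp
  | p :: l', pre, hnd => by
    have hnd0 : (pre.map Prod.fst ++ p.1 :: l'.map Prod.fst).Nodup := by
      simpa using hnd
    rcases List.nodup_append.1 hnd0 with ⟨_, hcons, hdisj⟩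
    have hfst1 : p.1 ∉ pre.map Prod.fst := fun hm => hdisj p.1 hm p.1 List.mem_cons_self rfl
    have hfst2 : p.1 ∉ l'.map Prod.fst := (List.nodup_cons.1 hcons).1
    have hco : (⟨pre.map (fun p => (p.1, pvScoreA p.2)) ++ p :: l'⟩ :
        PySem.Dict String Int).contains p.1 = true := by
      simp [PySem.Dict.contains]
    have hitems :
        ((⟨pre.map (fun p => (p.1, pvScoreA p.2)) ++ p :: l'⟩ :
            PySem.Dict String Int).insert p.1 (pvScoreA p.2)).items
          = (pre ++ [p]).map (fun p => (p.1, pvScoreA p.2)) ++ l' := by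
      unfold PySem.Dict.insert
      rw [hco]
      show List.map _ (pre.map (fun p => (p.1, pvScoreA p.2)) ++ p :: l') = _
      rw [List.map_append, List.map_cons]
      have e1 : List.map (fun q => if (q.1 == p.1) = true then (p.1, pvScoreA p.2) else q)
          (pre.map (fun p => (p.1, pvScoreA p.2)))
          = pre.map (fun p => (p.1, pvScoreA p.2)) := by
        refine (List.map_congr_left ?_).trans (List.map_id _)
        intro q hq
        have hne : ¬ (q.1 == p.1) = true := by
          simp only [beq_iff_eq]
          intro hqe
          rcases List.mem_map.1 hq with ⟨r, hr, rfl⟩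
          exact hfst1 (hqe ▸ List.mem_map.2 ⟨r, hr, rfl⟩)
        simp [hne]
      have e2 : (if (p.1 == p.1) = true then (p.1, pvScoreA p.2) else p)
          = (p.1, pvScoreA p.2) := by simp
      have e3 : List.map (fun q => if (q.1 == p.1) = true then (p.1, pvScoreA p.2) else q) l'
          = l' := by
        refine (List.map_congr_left ?_).trans (List.map_id _)
        intro q hq
        have hne : ¬ (q.1 == p.1) = true := by
          simp only [beq_iff_eq]
          intro hqe
          exact hfst2 (hqe ▸ List.mem_map.2 ⟨q, hq, rfl⟩)
        simp [hne]
      rw [e1, e2, e3]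
      simp
    have hnd' : (((pre ++ [p]) ++ l').map Prod.fst).Nodup := by
      rwa [List.append_cons] at hnd
    have IH := pvRescore_items l' (pre ++ [p]) hnd'
    calc (List.foldl (fun d kv => PySem.Dict.insert d kv.1 (pvScoreA kv.2))
            (⟨pre.map (fun p => (p.1, pvScoreA p.2)) ++ p :: l'⟩ : PySem.Dict String Int)
            (p :: l')).items
        = (List.foldl (fun d kv => PySem.Dict.insert d kv.1 (pvScoreA kv.2))
            (⟨(pre ++ [p]).map (fun p => (p.1, pvScoreA p.2)) ++ l'⟩ : PySem.Dict String Int)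
            l').items := by
          show (List.foldl _ (PySem.Dict.mk (((⟨pre.map (fun p => (p.1, pvScoreA p.2)) ++ p :: l'⟩ :
              PySem.Dict String Int).insert p.1 (pvScoreA p.2)).items)) l').items = _
          rw [congrArg PySem.Dict.mk hitems]
      _ = ((pre ++ [p]) ++ l').map (fun p => (p.1, pvScoreA p.2)) := IH
      _ = (pre ++ p :: l').map (fun p => (p.1, pvScoreA p.2)) := by rw [← List.append_cons]

-- sorted2 with an (Int, String) key pair is sorting by the lexicographic key
theorem pvSorted2_lex {α : Type} (xs : List α) (k1 : α → Int) (k2 : α → String) :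
    PySem.List.sorted2 xs k1 k2 false
      = PySem.List.sorted xs (fun x => toLex (k1 x, k2 x)) false := by
  unfold PySem.List.sorted2 PySem.List.sorted
  simp only [if_neg (by decide : ¬ (false = true))]
  congr 1
  funext acc x
  congr 1
  funext a b
  rcases lt_trichotomy (k1 a) (k1 b) with h | h | h
  · simp [h, Prod.Lex.lt_iff, not_lt_of_gt h]
  · simp [h, Prod.Lex.lt_iff]
  · simp [h, Prod.Lex.lt_iff, not_lt_of_gt h, ne_of_gt h]

theorem pvSum_if_count (x : Int) (c : Nat) : ∀ (scores : List Int),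
    (scores.map (fun sc => if x = sc then c else 0)).sum = scores.count x * c
  | [] => by simp
  | sc :: rest => by
    by_cases h : x = sc
    · subst h
      simp [pvSum_if_count x c rest, Nat.succ_mul, Nat.add_comm]
    · simp [h, Ne.symm h, pvSum_if_count x c rest]

theorem pvFlatMap_perm_congr {α β : Type} : ∀ (l : List α) (f g : α → List β),
    (∀ a ∈ l, (f a).Perm (g a)) → (l.flatMap f).Perm (l.flatMap g)
  | [], _, _, _ => List.Perm.refl _
  | a :: l, f, g, h => by
    simp only [List.flatMap_cons]
    exact (h a (List.mem_cons_self)).append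
      (pvFlatMap_perm_congr l f g (fun b hb => h b (List.mem_cons_of_mem a hb)))

theorem pvPartition_perm (L : List (String × Int)) (scores : List Int)
    (hsc : ∀ p ∈ L, p.2 ∈ scores) (hnd : scores.Nodup) :
    (scores.flatMap (fun sc => L.filter (fun p => p.2 == sc))).Perm L := by
  rw [List.perm_iff_count]
  intro q
  rw [List.flatMap_def, List.count_flatten, List.map_map]
  have hmap : (scores.map (List.count q ∘ fun sc => L.filter (fun p => p.2 == sc)))
      = scores.map (fun sc => if q.2 = sc then L.count q else 0) := by
    apply List.map_congr_left
    intro sc _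
    by_cases h : q.2 = sc
    · simp only [Function.comp_apply, if_pos h]
      exact List.count_filter (by simp [h])
    · simp only [Function.comp_apply, if_neg h]
      rw [List.count_eq_zero]
      intro hmem
      exact h (by simpa using (List.mem_filter.1 hmem).2)
  rw [hmap, pvSum_if_count]
  by_cases hq : q ∈ L
  · rw [List.count_eq_one_of_mem hnd (hsc q hq)]
    exact Nat.one_mul _
  · rw [List.count_eq_zero.2 hq, Nat.mul_zero]

-- the heart: sorting by the (score, name) pair = ascending-score buckets of sorted names
theorem pvSortBuckets (L : List (String × Int)) (scores : List Int)
    (hnd : (L.map Prod.fst).Nodup) (hsc : ∀ p ∈ L, p.2 ∈ scores)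
    (hscnd : scores.Pairwise (· < ·)) :
    (PySem.List.sorted2 L (fun e => e.2) (fun e => e.1) false).map Prod.fst
      = scores.flatMap (fun sc =>
          PySem.List.sorted ((L.filter (fun p => p.2 == sc)).map Prod.fst) (fun x => x) false) := by
  rw [pvSorted2_lex]
  set ns : Int → List String := fun sc =>
    PySem.List.sorted ((L.filter (fun p => p.2 == sc)).map Prod.fst) (fun x => x) false with hns
  set ys : List (String × Int) := scores.flatMap (fun sc => (ns sc).map (fun n => (n, sc)))
    with hys
  have hblock_perm : ∀ sc, ((ns sc).map (fun n => (n, sc))).Perm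
      (L.filter (fun p => p.2 == sc)) := by
    intro sc
    have h1 : (ns sc).Perm ((L.filter (fun p => p.2 == sc)).map Prod.fst) :=
      PySem.List.sorted_perm _ _ _
    have h2 := h1.map (fun n => (n, sc))
    rw [List.map_map] at h2
    refine h2.trans (List.Perm.of_eq ?_)
    refine (List.map_congr_left ?_).trans (List.map_id _)
    intro p hp
    have := (List.mem_filter.1 hp).2
    simp only [beq_iff_eq] at this
    simp [← this]
  have hperm : ys.Perm L := by
    refine (pvFlatMap_perm_congr scores _ _ (fun sc _ => hblock_perm sc)).trans ?_
    exact pvPartition_perm L scores hsc (hscnd.imp ne_of_lt)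
  have hblock_names_nodup : ∀ sc, (ns sc).Nodup := by
    intro sc
    have hsub : ((L.filter (fun p => p.2 == sc)).map Prod.fst).Sublist (L.map Prod.fst) :=
      List.Sublist.map Prod.fst List.filter_sublist
    exact ((PySem.List.sorted_perm _ _ _).nodup_iff).2 (hnd.sublist hsub)
  have hpw : ys.Pairwise (fun a b =>
      (fun e : String × Int => toLex (e.2, e.1)) a < (fun e => toLex (e.2, e.1)) b) := by
    rw [hys, List.flatMap_def]
    rw [List.pairwise_flatten]
    constructor
    · intro l hl
      rcases List.mem_map.1 hl with ⟨sc, _, rfl⟩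
      have h1 : (ns sc).Pairwise (· ≤ ·) := by
        have := PySem.List.sorted_pairwise
          ((L.filter (fun p => p.2 == sc)).map Prod.fst) (fun x : String => x) 
        simpa [hns] using this
      have h2 : (ns sc).Pairwise (· ≠ ·) := hblock_names_nodup sc
      have h3 : (ns sc).Pairwise (· < ·) :=
        (h1.and h2).imp (fun h => lt_of_le_of_ne h.1 h.2)
      exact h3.map _ (fun a b hab => Prod.Lex.lt_iff.2 (Or.inr ⟨rfl, hab⟩))
    · rw [List.pairwise_map]
      refine hscnd.imp_of_mem ?_
      intro sc1 sc2 _ _ h12 x hx y hy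
      rcases List.mem_map.1 hx with ⟨n1, _, rfl⟩
      rcases List.mem_map.1 hy with ⟨n2, _, rfl⟩
      exact Prod.Lex.lt_iff.2 (Or.inl h12)
  rw [PySem.List.sorted_eq_of_perm_of_pairwise_lt L ys _ hperm hpw]
  simp [hys, List.map_flatMap, List.map_map, Function.comp_def]

-- assembling: A's pipeline equals B's bucket concatenation
theorem pvMain (emails : List String) : solution emails = solution_alt emails := by
  show (PySem.List.sorted2 (((emails.foldl pvStepA PySem.Dict.empty).items.foldl
        (fun d kv => PySem.Dict.insert d kv.1 (pvScoreA kv.2))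
        (emails.foldl pvStepA PySem.Dict.empty))).items
        (fun e => e.2) (fun e => e.1) false).map (fun e => e.1)
      = [(-25 : Int), -15, -5, -3, 0].foldl (fun out sc =>
          out ++ PySem.List.sorted (((emails.foldl pvStepB PySem.Dict.empty).items.filter
            (fun kv => pvScoreB kv.2 == sc)).map (fun kv => kv.1)) (fun x => x) false) []
  have hrel : (emails.foldl pvStepA PySem.Dict.empty).items
      = (emails.foldl pvStepB PySem.Dict.empty).items.map (fun p => (p.1, 20 * p.2)) :=
    pvBuild_rel emails _ _ (by simp [PySem.Dict.empty])
  have hkeys : ((emails.foldl pvStepB PySem.Dict.empty).items.map Prod.fst).Nodup := by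
    have := pvBuildB_keys_nodup emails PySem.Dict.empty PySem.Dict.nodup_keys_empty
    simpa [PySem.Dict.keys] using this
  have hAkeys : ((emails.foldl pvStepA PySem.Dict.empty).items.map Prod.fst).Nodup := by
    rw [hrel, List.map_map]
    simpa [Function.comp_def] using hkeys
  have hresc := pvRescore_items (emails.foldl pvStepA PySem.Dict.empty).items []
    (by simpa using hAkeys)
  have hitems2 : ((emails.foldl pvStepA PySem.Dict.empty).items.foldl
        (fun d kv => PySem.Dict.insert d kv.1 (pvScoreA kv.2))
        (emails.foldl pvStepA PySem.Dict.empty)).items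
      = (emails.foldl pvStepB PySem.Dict.empty).items.map (fun p => (p.1, pvScoreB p.2)) := by
    refine (hresc.trans ?_)
    rw [List.nil_append, hrel, List.map_map]
    apply List.map_congr_left
    intro p _
    simp [pvScoreAB]
  rw [hitems2, PySem.List.foldl_append_eq_flatMap, List.nil_append]
  have hnd' : (((emails.foldl pvStepB PySem.Dict.empty).items.map
      (fun p => (p.1, pvScoreB p.2))).map Prod.fst).Nodup := by
    rw [List.map_map]
    simpa [Function.comp_def] using hkeys
  have hsc' : ∀ p ∈ (emails.foldl pvStepB PySem.Dict.empty).items.map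
      (fun p => (p.1, pvScoreB p.2)), p.2 ∈ [(-25 : Int), -15, -5, -3, 0] := by
    intro p hp
    rcases List.mem_map.1 hp with ⟨q, _, rfl⟩
    exact pvScoreB_mem q.2
  have hb := pvSortBuckets ((emails.foldl pvStepB PySem.Dict.empty).items.map
      (fun p => (p.1, pvScoreB p.2))) [(-25 : Int), -15, -5, -3, 0] hnd' hsc' (by decide)
  refine hb.trans ?_
  congr 1
  funext sc
  rw [List.filter_map, List.map_map]
  rfl

-- ===== VERDICT (by name: the statement is the Claim_ definition above) =====
theorem solution_spec : Claim_equal_solution := by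
  intro emails _ _
  exact pvMain emails
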